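-- pv_equiv track=rewrite | github.com/claire-j-wells/motif-mark | motif-mark-oop.py | exon_intron_split
-- ===== SOURCE A (Python) =====
-- def exon_intron_split(sequence):
--     uplow = sequence[0].isupper() # boolean to check whether the first letter is uppercase or not
--     splitted = []
--     new_word = ""
--     position_counter = 0
--     for c in sequence:
--         if c.isupper() == uplow:
--             new_word += c
--             position_counter+=1
--         else:
--             if c.isupper()!=True:
--                 splitted.append(("E",new_word,len(new_word),position_counter-len(new_word)))
--             else:
--                 splitted.append(("I",new_word,len(new_word),position_counter-len(new_word)))
--             new_word = c
--             position_counter+=1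
--             uplow = not uplow
--     if c.isupper()==True:
--                 splitted.append(("E",new_word,len(new_word),position_counter-len(new_word)))
--     else:
--                 splitted.append(("I",new_word,len(new_word),position_counter-len(new_word)))
--       # bc no change at end of string
--     return(splitted)
-- ===== SOURCE B (Python) =====
-- def exon_intron_split(sequence):
--     # Two-pointer run scanner: each outer step finds one maximal case-run [i:j]
--     # and emits it with its slice, length and start position.
--     result = []
--     i = 0
--     n = len(sequence)
--     while i < n:
--         key = sequence[i].isupper()
--         j = i + 1
--         while j < n and sequence[j].isupper() == key:
--             j += 1
--         result.append(("E" if key else "I", sequence[i:j], j - i, i))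
--         i = j
--     return result
-- ===== Notes on version B (the rewrite author's own statement) =====
-- stated objective: alternative
-- what changed: Replaced A's char-by-char fold that accumulates a growing word, a position counter and a flipping case flag (plus a trailing flush keyed on leftover loop state) by a two-pointer scan that finds each maximal case-run [i:j] directly and emits it as a slice with its length and start.
import Mathlib
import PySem

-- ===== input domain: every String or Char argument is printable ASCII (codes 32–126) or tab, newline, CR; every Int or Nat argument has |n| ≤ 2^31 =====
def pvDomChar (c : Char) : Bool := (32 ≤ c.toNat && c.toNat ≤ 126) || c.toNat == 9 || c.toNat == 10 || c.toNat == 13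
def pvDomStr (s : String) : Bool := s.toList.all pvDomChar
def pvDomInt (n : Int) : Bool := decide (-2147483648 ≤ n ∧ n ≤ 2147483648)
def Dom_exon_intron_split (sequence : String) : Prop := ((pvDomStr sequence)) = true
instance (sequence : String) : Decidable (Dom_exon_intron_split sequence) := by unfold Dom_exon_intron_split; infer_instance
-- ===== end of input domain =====

-- B replaces A's accumulating fold (growing word + counter + flipping flag + trailing flush)
-- by a two-pointer maximal-run scan; objective: alternative (not measured faster).

-- ===== PORT A =====
-- A's loop state: (splitted, new_word as List Char for Python's growing string, position_counter, uplow, last seen c)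
def pvAStep (st : List (String × String × Int × Int) × List Char × Int × Bool × Char) (c : Char) :
    List (String × String × Int × Int) × List Char × Int × Bool × Char :=
  match st with
  | (splitted, new_word, pos, uplow, _) =>
    if PySem.Chars.isupper c == uplow then
      (splitted, new_word ++ [c], pos + 1, uplow, c)
    else
      let entry :=
        if PySem.Chars.isupper c != true then
          (("E" : String), String.mk new_word, (new_word.length : Int), pos - new_word.length)
        else
          (("I" : String), String.mk new_word, (new_word.length : Int), pos - new_word.length)
      (splitted ++ [entry], [c], pos + 1, !uplow, c)

-- the code after the for-loop: one final append keyed on the last loop variable c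
def pvAFinish (st : List (String × String × Int × Int) × List Char × Int × Bool × Char) :
    List (String × String × Int × Int) :=
  match st with
  | (splitted, new_word, pos, _, c) =>
    if PySem.Chars.isupper c == true then
      splitted ++ [(("E" : String), String.mk new_word, (new_word.length : Int), pos - new_word.length)]
    else
      splitted ++ [(("I" : String), String.mk new_word, (new_word.length : Int), pos - new_word.length)]

def exon_intron_split (sequence : String) : List (String × String × Int × Int) :=
  match sequence.toList with
  | [] => []  -- Python raises IndexError at sequence[0]; excluded by Pre_
  | c0 :: rest =>
    pvAFinish ((c0 :: rest).foldl pvAStep ([], [], 0, PySem.Chars.isupper c0, c0))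

-- ===== PORT B =====
-- inner while: advance j while j < n and sequence[j].isupper() == key
def pvAltInner (cs : List Char) (n : Nat) (key : Bool) (j : Nat) : Nat :=
  if h : j < n ∧ PySem.Chars.isupper (cs.getD j ' ') == key then
    pvAltInner cs n key (j + 1)
  else j
termination_by n - j
decreasing_by omega

theorem pvAltInner_ge (cs : List Char) (n : Nat) (key : Bool) (j : Nat) :
    j ≤ pvAltInner cs n key j := by
  fun_induction pvAltInner cs n key j with
  | case1 j h ih => omega
  | case2 j h => omega

-- outer while over run starts i; (cs.drop i).take (j-i) is Python's slice sequence[i:j] (0 ≤ i ≤ j)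
def pvAltOuter (cs : List Char) (n i : Nat) (acc : List (String × String × Int × Int)) :
    List (String × String × Int × Int) :=
  if h : i < n then
    let key := PySem.Chars.isupper (cs.getD i ' ')
    let j := pvAltInner cs n key (i + 1)
    pvAltOuter cs n j
      (acc ++ [((if key then "E" else "I"), String.mk ((cs.drop i).take (j - i)),
                ((j : Int) - (i : Int)), (i : Int))])
  else acc
termination_by n - i
decreasing_by have := pvAltInner_ge cs n (PySem.Chars.isupper (cs.getD i ' ')) (i + 1); omega

def exon_intron_split_alt (sequence : String) : List (String × String × Int × Int) :=
  pvAltOuter sequence.toList sequence.toList.length 0 []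

-- ===== PRECONDITION & SPEC =====
-- Pre_ excludes only the empty string, on which A raises IndexError at sequence[0].
def Pre_exon_intron_split (sequence : String) : Prop := sequence ≠ ""
instance (sequence : String) : Decidable (Pre_exon_intron_split sequence) := by
  unfold Pre_exon_intron_split; infer_instance
def pvWitness_exon_intron_split : String := "aA"

def Spec_exon_intron_split (sequence : String) (out : List (String × String × Int × Int)) : Prop :=
  out = exon_intron_split_alt sequence
instance (sequence : String) (out : List (String × String × Int × Int)) :
    Decidable (Spec_exon_intron_split sequence out) := by
  unfold Spec_exon_intron_split; infer_instance

-- ===== CLAIM (what is proved, stated in full; the proofs are below) =====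
def Claim_equal_exon_intron_split : Prop :=
  ∀ (sequence : String), Dom_exon_intron_split sequence → Pre_exon_intron_split sequence →
    Spec_exon_intron_split sequence (exon_intron_split sequence)

-- ===== LEMMAS AND PROOFS =====

def pvTag (u : Bool) : String := if u then "E" else "I"

-- common characterization: the list of maximal case-runs of cs starting at position i
def pvRuns : List Char → Int → List (String × String × Int × Int)
  | [], _ => []
  | c :: rest, i =>
    let t := List.takeWhile (fun d => PySem.Chars.isupper d == PySem.Chars.isupper c) (c :: rest)
    (pvTag (PySem.Chars.isupper c), String.mk t, (t.length : Int), i)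
      :: pvRuns (List.drop t.length (c :: rest)) (i + t.length)
termination_by cs _ => cs.length
decreasing_by
  simp only [List.takeWhile_cons, beq_self_eq_true, if_pos, List.length_drop, List.length_cons]
  omega

-- A's fold with a live partial run (w, u, start) equals runs-from-partial
def pvRunsFrom (w : List Char) (u : Bool) (start : Int) :
    List Char → List (String × String × Int × Int)
  | [] => [(pvTag u, String.mk w, (w.length : Int), start)]
  | c :: cs =>
    if PySem.Chars.isupper c == u then pvRunsFrom (w ++ [c]) u start cs
    else (pvTag u, String.mk w, (w.length : Int), start)
      :: pvRunsFrom [c] (!u) (start + w.length) cs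

theorem pvDropLenTakeWhile (p : Char → Bool) (l : List Char) :
    l.drop (l.takeWhile p).length = l.dropWhile p := by
  induction l with
  | nil => rfl
  | cons c cs ih =>
    by_cases h : p c
    · simp [List.takeWhile_cons, List.dropWhile_cons, h, ih]
    · simp [List.takeWhile_cons, List.dropWhile_cons, h]

-- bridge: runs-from-partial = head run (w extended by the matching prefix) :: pvRuns of the rest
theorem pvRunsFrom_eq (cs : List Char) : ∀ (w : List Char) (u : Bool) (start : Int),
    pvRunsFrom w u start cs =
      (pvTag u, String.mk (w ++ cs.takeWhile (fun d => PySem.Chars.isupper d == u)),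
        ((w.length + (cs.takeWhile (fun d => PySem.Chars.isupper d == u)).length : Nat) : Int),
        start)
        :: pvRuns (cs.dropWhile (fun d => PySem.Chars.isupper d == u))
            (start + ((w.length + (cs.takeWhile (fun d => PySem.Chars.isupper d == u)).length : Nat) : Int)) := by
  induction cs with
  | nil => intro w u start; simp [pvRunsFrom, pvRuns]
  | cons c cs ih =>
    intro w u start
    by_cases h : PySem.Chars.isupper c = u
    · rw [pvRunsFrom, if_pos (by simp [h]), ih (w ++ [c]) u start]
      simp [List.takeWhile_cons, List.dropWhile_cons, h]
      constructor
      · push_cast; ring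
      · push_cast; ring_nf
    · rw [pvRunsFrom, if_neg (by simp [h])]
      have hneg : PySem.Chars.isupper c = !u := by cases hu : PySem.Chars.isupper c <;> simp_all
      rw [List.takeWhile_cons, if_neg (by simp [hneg]),
          List.dropWhile_cons, if_neg (by simp [hneg])]
      simp only [List.append_nil, List.takeWhile_nil, List.length_nil, Nat.add_zero]
      rw [pvRuns]
      simp only [hneg]
      rw [ih [c] (!u) (start + w.length)]
      rw [List.takeWhile_cons, if_pos (by simp [hneg])]
      have hdrop := pvDropLenTakeWhile (fun d => PySem.Chars.isupper d == !u) cs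
      simp only [List.singleton_append, List.length_cons, List.length_nil,
        List.drop_succ_cons, hdrop, Nat.zero_add, Nat.add_comm]
      rw [show List.drop (1 + (List.takeWhile (fun d => PySem.Chars.isupper d == !u) cs).length) (c :: cs)
            = List.dropWhile (fun d => PySem.Chars.isupper d == !u) cs by
        rw [Nat.add_comm, List.drop_succ_cons, hdrop]]

-- A's fold + finish from a valid partial state produces runs-from-partial
theorem pvAFold_eq (cs : List Char) :
    ∀ (S : List (String × String × Int × Int)) (w : List Char) (p : Int) (u : Bool) (l : Char),
      w ≠ [] → PySem.Chars.isupper l = u →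
      pvAFinish (cs.foldl pvAStep (S, w, p, u, l)) = S ++ pvRunsFrom w u (p - w.length) cs := by
  induction cs with
  | nil =>
    intro S w p u l hw hl
    cases u <;> simp [pvAFinish, pvRunsFrom, pvTag, hl]
  | cons c cs ih =>
    intro S w p u l hw hl
    by_cases h : PySem.Chars.isupper c = u
    · rw [List.foldl_cons, show pvAStep (S, w, p, u, l) c = (S, w ++ [c], p + 1, u, c) by
          simp [pvAStep, h]]
      rw [ih S (w ++ [c]) (p + 1) u c (by simp) h]
      rw [pvRunsFrom, if_pos (by simp [h])]
      congr 1
      simp only [List.length_append, List.length_cons, List.length_nil]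
      push_cast; ring
    · have hneg : PySem.Chars.isupper c = !u := by cases hu : PySem.Chars.isupper c <;> simp_all
      have hstep : pvAStep (S, w, p, u, l) c =
          (S ++ [(pvTag u, String.mk w, (w.length : Int), p - w.length)], [c], p + 1, !u, c) := by
        cases u <;> simp_all [pvAStep, pvTag]
      rw [List.foldl_cons, hstep, ih _ [c] (p + 1) (!u) c (by simp) hneg]
      rw [pvRunsFrom, if_neg (by simp [h]), List.append_assoc, List.singleton_append,
          show (p + 1 - (([c] : List Char).length : Int)) = p - (w.length : Int) + (w.length : Int) by
            push_cast [List.length_cons, List.length_nil]; ring]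
termination_by cs => cs.length

-- inner while = i-plus-length-of-matching-prefix
theorem pvAltInner_eq (cs : List Char) (key : Bool) : ∀ (j : Nat),
    pvAltInner cs cs.length key j =
      j + ((cs.drop j).takeWhile (fun d => PySem.Chars.isupper d == key)).length := by
  intro j
  fun_induction pvAltInner cs cs.length key j with
  | case1 j h ih =>
    obtain ⟨hj, hk⟩ := h
    rw [List.drop_eq_getElem_cons hj, List.takeWhile_cons,
        if_pos (by simpa [List.getD, List.getElem?_eq_getElem hj] using hk)]
    simp only [List.length_cons]
    omega
  | case2 j h =>
    by_cases hj : j < cs.length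
    · have hk : ¬ (PySem.Chars.isupper (cs.getD j ' ') == key) = true := by tauto
      rw [List.drop_eq_getElem_cons hj, List.takeWhile_cons,
          if_neg (by simpa [List.getD, List.getElem?_eq_getElem hj] using hk)]
      simp
    · rw [List.drop_eq_nil_of_le (by omega)]; simp

-- outer while = pvRuns of the tail
theorem pvAltOuter_eq (cs : List Char) : ∀ (i : Nat) (acc : List (String × String × Int × Int)),
    pvAltOuter cs cs.length i acc = acc ++ pvRuns (cs.drop i) (i : Int) := by
  intro i acc
  fun_induction pvAltOuter cs cs.length i acc with
  | case1 i acc h key j ih =>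
    have hkey : key = PySem.Chars.isupper cs[i] := by
      simp [key, List.getD, List.getElem?_eq_getElem h]
    have hdropi : cs.drop i = cs[i] :: cs.drop (i + 1) := List.drop_eq_getElem_cons h
    have htw : (cs.drop i).takeWhile (fun d => PySem.Chars.isupper d == key)
        = cs[i] :: (cs.drop (i + 1)).takeWhile (fun d => PySem.Chars.isupper d == key) := by
      rw [hdropi, List.takeWhile_cons, if_pos (by simp [hkey])]
    have hj : j = i + ((cs.drop i).takeWhile (fun d => PySem.Chars.isupper d == key)).length := by
      rw [htw]; simp only [List.length_cons]
      have := pvAltInner_eq cs key (i + 1)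
      simp only [j, this]; omega
    simp only [dite_eq_ite] at ih
    set t := (cs.drop i).takeWhile (fun d => PySem.Chars.isupper d == key) with ht
    have htpre : (cs.drop i).take t.length = t := by
      have := (List.takeWhile_prefix (l := cs.drop i) (p := fun d => PySem.Chars.isupper d == key))
      exact (List.prefix_iff_eq_take.mp this).symm
    rw [ih]
    rw [show pvRuns (cs.drop i) (i : Int) =
        (pvTag (PySem.Chars.isupper cs[i]), String.mk t, (t.length : Int), (i : Int))
          :: pvRuns ((cs.drop i).drop t.length) ((i : Int) + t.length) by
      rw [hdropi, pvRuns]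
      simp only [← hdropi, ← hkey, ← ht]]
    rw [List.append_assoc]
    have h1 : String.mk (List.take (j - i) (List.drop i cs)) = String.mk t := by
      rw [hj, Nat.add_sub_cancel_left, htpre]
    have h2 : ((j : Nat) : Int) - (i : Int) = (t.length : Int) := by rw [hj]; push_cast; ring
    have h3 : List.drop j cs = (List.drop i cs).drop t.length := by rw [hj, List.drop_drop, Nat.add_comm]
    have h4 : ((j : Nat) : Int) = (i : Int) + (t.length : Int) := by rw [hj]; push_cast; ring
    rw [h1, h2, h3, h4]
    simp [pvTag, hkey]
  | case2 i acc h =>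
    rw [List.drop_eq_nil_of_le (by omega)]
    simp [pvRuns]

-- ===== VERDICT (by name: the statement is the Claim_ definition above) =====
theorem exon_intron_split_spec : Claim_equal_exon_intron_split := by
  intro s _ hpre
  unfold Spec_exon_intron_split exon_intron_split exon_intron_split_alt
  cases hcs : s.toList with
  | nil => exact absurd (String.toList_eq_nil_iff.mp hcs) hpre
  | cons c0 rest =>
    show pvAFinish ((c0 :: rest).foldl pvAStep ([], [], 0, PySem.Chars.isupper c0, c0))
        = pvAltOuter (c0 :: rest) (c0 :: rest).length 0 []
    rw [List.foldl_cons, show pvAStep ([], [], 0, PySem.Chars.isupper c0, c0)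
        c0 = ([], [c0], 1, PySem.Chars.isupper c0, c0) by simp [pvAStep]]
    rw [pvAFold_eq rest [] [c0] 1 (PySem.Chars.isupper c0) c0 (by simp) rfl]
    rw [pvAltOuter_eq (c0 :: rest) 0 []]
    rw [pvRunsFrom_eq rest [c0] (PySem.Chars.isupper c0) (1 - ([c0].length : Int))]
    simp only [List.drop_zero, List.nil_append, Nat.cast_zero]
    rw [show pvRuns (c0 :: rest) (0 : Int) =
        (pvTag (PySem.Chars.isupper c0),
          String.mk ((c0 :: rest).takeWhile (fun d => PySem.Chars.isupper d == PySem.Chars.isupper c0)),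
          (((c0 :: rest).takeWhile (fun d => PySem.Chars.isupper d == PySem.Chars.isupper c0)).length : Int),
          (0 : Int))
          :: pvRuns (((c0 :: rest).dropWhile (fun d => PySem.Chars.isupper d == PySem.Chars.isupper c0)))
              (((c0 :: rest).takeWhile (fun d => PySem.Chars.isupper d == PySem.Chars.isupper c0)).length : Int) by
      rw [pvRuns]
      have hd := pvDropLenTakeWhile (fun d => PySem.Chars.isupper d == PySem.Chars.isupper c0) (c0 :: rest)
      rw [hd]
      simp]
    rw [List.takeWhile_cons, if_pos (by simp), List.dropWhile_cons, if_pos (by simp)]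
    simp only [List.singleton_append, List.cons.injEq, Prod.mk.injEq, List.length_cons,
      List.length_nil]
    norm_num
    refine ⟨by ring, ?_⟩
    rw [Int.add_comm]
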